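-- pv_equiv track=rewrite | github.com/kkb00714/Basic-Coding-Test | 프로그래머스/unrated/181921. 배열 만들기 2/배열 만들기 2.py | solution
-- ===== SOURCE A (Python) =====
-- def solution(l, r):
--     answer = []
--     nums = False
--
--     # 정수 l, r 이 주어졌을 때, l 이상 r 이하의 정수 중, 숫자 0, 5 으로만 이루어진 모든 정수를 오름차순으로 배열하기
--
--     for i in range(l, r + 1):
--         if all(digit in {'0', '5'} for digit in str(i)):
--         # for digit in str(i) => 정수 i를 문자열로 변환 후
--         # 그 문자열을 순환하면서 각 문자를 digit 변수에 할당함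
--
--         # all~ => digit 가 0 또는 5와 일치하는지 확인함.
--         # digit 가 모든 문자에 대해 0 또는 5와 일치한다면
--         # all 함수는 True 를 반환하고, 그렇지 않으면 False를 반환
--             answer.append(i)
--             nums = True
--
--     if not nums:
--         answer.append(-1)
--
--
--     return answer
-- ===== SOURCE B (Python) =====
-- def solution(l, r):
--     # Generate every number made of digits {0,5} up to r (BFS by digit length,
--     # each level produced in increasing order), then keep those in [l, r].
--     cands = [0]
--     level = [5]
--     while level:
--         nxt = []
--         for x in level:
--             if x <= r:
--                 cands.append(x)
--                 nxt.append(10 * x)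
--                 nxt.append(10 * x + 5)
--         level = nxt
--     ans = [x for x in cands if l <= x <= r]
--     return ans if ans else [-1]
-- ===== Notes on version B (the rewrite author's own statement) =====
-- stated objective: faster
-- what changed: Instead of scanning every integer in [l,r] and checking its decimal digits, B generates the (few) numbers made only of digits 0 and 5 up to r by breadth-first expansion (x -> 10x, 10x+5) in increasing order and filters them to [l,r].
import Mathlib
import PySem

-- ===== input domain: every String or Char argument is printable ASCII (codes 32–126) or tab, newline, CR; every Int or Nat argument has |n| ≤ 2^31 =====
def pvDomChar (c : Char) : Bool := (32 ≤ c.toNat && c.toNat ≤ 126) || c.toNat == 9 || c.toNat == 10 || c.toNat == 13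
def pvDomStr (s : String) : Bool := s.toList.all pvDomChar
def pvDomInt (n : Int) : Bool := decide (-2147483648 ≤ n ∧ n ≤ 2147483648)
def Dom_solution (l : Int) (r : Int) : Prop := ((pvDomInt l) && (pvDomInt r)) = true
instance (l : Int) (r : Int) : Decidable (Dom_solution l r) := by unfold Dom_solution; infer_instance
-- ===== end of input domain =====

-- B enumerates the numbers made of digits {0,5} up to r directly (breadth-first by digit
-- count) instead of scanning every integer in [l,r]; measurably faster on wide ranges.

-- ===== PORT A =====
-- `all(digit in {'0','5'} for digit in str(i))`
def pvPred (i : Int) : Bool :=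
  (PySem.Int.toStr i).toList.all (fun c => (PySem.Set.ofList ['0', '5']).contains c)

def solution (l : Int) (r : Int) : List Int :=
  -- answer = []; nums = False; for i in range(l, r+1): if all(...): answer.append(i); nums = True
  let st := (PySem.List.pyRange l (r + 1) 1).foldl
    (fun (st : List Int × Bool) i => if pvPred i then (st.1 ++ [i], true) else st)
    (([] : List Int), false)
  -- if not nums: answer.append(-1)
  if st.2 = false then st.1 ++ [-1] else st.1

-- ===== PORT B =====
-- body of `for x in level: if x <= r: cands.append(x); nxt.append(10*x); nxt.append(10*x+5)`
def pvStep (r : Int) (st : List Int × List Int) (x : Int) : List Int × List Int :=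
  if x ≤ r then (st.1 ++ [x], st.2 ++ [10 * x, 10 * x + 5]) else st

-- `while level:` — fuel only makes the loop structurally recursive; 20 rounds cover every |r| ≤ 2^31
def pvLoop (r : Int) : Nat → List Int → List Int → List Int
  | 0, cands, _ => cands
  | f + 1, cands, level =>
    if level.isEmpty then cands
    else
      let st := level.foldl (pvStep r) (cands, ([] : List Int))
      pvLoop r f st.1 st.2

def solution_alt (l : Int) (r : Int) : List Int :=
  let cands := pvLoop r 20 [0] [5]
  let ans := cands.filter (fun x => decide (l ≤ x) && decide (x ≤ r))
  if ans.isEmpty then [-1] else ans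

-- ===== PRECONDITION & SPEC =====
def Spec_solution (l : Int) (r : Int) (out : List Int) : Prop := out = solution_alt l r
instance (l : Int) (r : Int) (out : List Int) : Decidable (Spec_solution l r out) := by unfold Spec_solution; infer_instance

-- ===== CLAIM (what is proved, stated in full; the proofs are below) =====
def Claim_equal_solution : Prop := ∀ (l : Int) (r : Int), Dom_solution l r → Spec_solution l r (solution l r)

-- ===== LEMMAS AND PROOFS =====

/-- `n`'s decimal digits are all 0 or 5. -/
def goodN (n : Nat) : Bool := (Nat.digits 10 n).all (fun d => d == 0 || d == 5)

/-- positive and made of digits 0/5 -/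
def Gh (x : Int) : Prop := 0 < x ∧ goodN x.toNat = true

/-- `x` is a decimal prefix of `y` -/
def Anc (x y : Int) : Prop := ∃ m : Nat, y.toNat / 10 ^ m = x.toNat

lemma goodN_zero : goodN 0 = true := by simp [goodN]

lemma goodN_succ (n : Nat) (h : 0 < n) :
    goodN n = ((n % 10 == 0 || n % 10 == 5) && goodN (n / 10)) := by
  unfold goodN
  rw [Nat.digits_def' (by norm_num : (1 : ℕ) < 10) h]
  simp

lemma good_div (n : Nat) (h : goodN n = true) : goodN (n / 10) = true := by
  rcases Nat.eq_zero_or_pos n with h0 | h0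
  · simp [h0, goodN_zero]
  · rw [goodN_succ n h0] at h; simp only [Bool.and_eq_true] at h; exact h.2

lemma good_divpow (n : Nat) (m : Nat) (h : goodN n = true) : goodN (n / 10 ^ m) = true := by
  induction m generalizing n with
  | zero => simpa using h
  | succ m ih =>
    have := ih (n / 10) (good_div n h)
    rwa [Nat.div_div_eq_div_mul, ← pow_succ'] at this

lemma good_mod (n : Nat) (h0 : 0 < n) (h : goodN n = true) : n % 10 = 0 ∨ n % 10 = 5 := by
  rw [goodN_succ n h0] at h
  simp only [Bool.and_eq_true, Bool.or_eq_true, beq_iff_eq] at h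
  exact h.1

lemma good_lead (n : Nat) (h0 : 0 < n) (h : goodN n = true) : ∃ m, n / 10 ^ m = 5 := by
  induction n using Nat.strong_induction_on with
  | _ n ih =>
    by_cases hn : n < 10
    · refine ⟨0, ?_⟩
      rcases good_mod n h0 h with h' | h' <;> omega
    · have hd0 : 0 < n / 10 := Nat.div_pos (by omega) (by norm_num)
      obtain ⟨m, hm⟩ := ih (n / 10) (Nat.div_lt_self h0 (by norm_num)) hd0 (good_div n h)
      refine ⟨m + 1, ?_⟩
      rw [pow_succ', ← Nat.div_div_eq_div_mul, hm]

lemma good_child (n : Nat) (d : Nat) (hd : d < 10) (h : goodN n = true) (h0 : 0 < 10 * n + d) :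
    goodN (10 * n + d) = ((d == 0 || d == 5) && true) := by
  rw [goodN_succ _ h0]
  have h1 : (10 * n + d) % 10 = d := by omega
  have h2 : (10 * n + d) / 10 = n := by omega
  rw [h1, h2, h]

-- ===== toDigits characterisation (A's predicate) =====

lemma toDigitsCore_eq (f : Nat) : ∀ (n : Nat) (acc : List Char), 0 < f → n < 10 ^ f →
    Nat.toDigitsCore 10 f n acc
      = (if n = 0 then ['0'] else (Nat.digits 10 n).reverse.map Nat.digitChar) ++ acc := by
  induction f with
  | zero => intro n acc h; omega
  | succ f ih =>
    intro n acc _ hlt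
    rw [Nat.toDigitsCore]
    by_cases hz : n / 10 = 0
    · rw [if_pos hz]
      by_cases h0 : n = 0
      · simp [h0]; rfl
      · have hn10 : n < 10 := by omega
        rw [if_neg h0, show Nat.digits 10 n = n % 10 :: Nat.digits 10 (n / 10) from
          Nat.digits_def' (by norm_num : (1 : ℕ) < 10) (by omega)]
        have hnil : Nat.digits 10 (n / 10) = [] := by rw [hz]; simp
        simp [hnil, Nat.mod_eq_of_lt hn10]
    · rw [if_neg hz]
      have hf : 0 < f := by
        rcases Nat.eq_zero_or_pos f with h | h
        · subst h; simp at hlt; omega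
        · exact h
      rw [ih (n / 10) _ hf (by
        have : n < 10 * 10 ^ f := by rw [← pow_succ']; exact hlt
        omega)]
      rw [if_neg (show ¬ n = 0 by omega), show Nat.digits 10 n = n % 10 :: Nat.digits 10 (n / 10) from
        Nat.digits_def' (by norm_num : (1 : ℕ) < 10) (by omega)]
      rw [if_neg hz]
      simp

lemma toDigits_eq (n : Nat) :
    Nat.toDigits 10 n = if n = 0 then ['0'] else (Nat.digits 10 n).reverse.map Nat.digitChar := by
  have h1 : n < 10 ^ (n + 1) := by
    calc n < 2 ^ n * 2 := by have := Nat.lt_two_pow_self (n := n); omega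
    _ ≤ 10 ^ n * 10 := by
        exact Nat.mul_le_mul (Nat.pow_le_pow_left (by norm_num) n) (by norm_num)
    _ = 10 ^ (n + 1) := by rw [pow_succ]
  simpa using toDigitsCore_eq (n + 1) n [] (by omega) h1

lemma digitChar_mem (d : Nat) (hd : d < 10) :
    ((PySem.Set.ofList ['0', '5']).contains (Nat.digitChar d)) = (d == 0 || d == 5) := by
  interval_cases d <;> decide

lemma pvPred_iff (i : Int) : pvPred i = true ↔ 0 ≤ i ∧ goodN i.toNat = true := by
  unfold pvPred
  rw [PySem.Int.toList_toStr]
  unfold PySem.Int.toChars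
  by_cases hneg : i < 0
  · rw [if_pos hneg]
    simp only [List.all_cons]
    constructor
    · intro h
      exfalso
      simp only [Bool.and_eq_true] at h
      exact absurd h.1 (by decide)
    · intro h; omega
  · rw [if_neg hneg]
    rw [toDigits_eq]
    by_cases h0 : i.toNat = 0
    · rw [if_pos h0]
      constructor
      · intro _; exact ⟨by omega, by rw [h0]; exact goodN_zero⟩
      · intro _; decide
    · rw [if_neg h0]
      rw [List.all_map, List.all_reverse]
      unfold goodN
      constructor
      · intro h
        refine ⟨by omega, ?_⟩
        rw [List.all_eq_true] at h ⊢
        intro d hd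
        have hlt : d < 10 := Nat.digits_lt_base (by norm_num) hd
        rw [← digitChar_mem d hlt]
        exact h d hd
      · intro ⟨_, h⟩
        rw [List.all_eq_true] at h ⊢
        intro d hd
        have hlt : d < 10 := Nat.digits_lt_base (by norm_num) hd
        rw [Function.comp_apply, digitChar_mem d hlt]
        exact h d hd

-- ===== loop shapes =====

lemma foldA (L : List Int) (acc : List Int) (b : Bool) :
    L.foldl (fun (st : List Int × Bool) i => if pvPred i then (st.1 ++ [i], true) else st) (acc, b)
      = (acc ++ L.filter pvPred, b || !(L.filter pvPred).isEmpty) := by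
  induction L generalizing acc b with
  | nil => simp
  | cons x xs ih =>
    simp only [List.foldl_cons, List.filter_cons]
    by_cases hx : pvPred x
    · rw [if_pos hx, if_pos hx, ih]
      simp
    · rw [if_neg hx, if_neg (by simpa using hx), ih]

lemma foldB (r : Int) (level : List Int) : ∀ (cands acc : List Int),
    level.foldl (pvStep r) (cands, acc)
      = (cands ++ level.filter (fun x => decide (x ≤ r)),
         acc ++ (level.filter (fun x => decide (x ≤ r))).flatMap (fun x => [10 * x, 10 * x + 5])) := by
  induction level with
  | nil => intro cands acc; simp
  | cons x xs ih =>
    intro cands acc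
    simp only [List.foldl_cons, List.filter_cons, pvStep]
    by_cases hx : x ≤ r
    · rw [if_pos hx, if_pos (by simpa using hx), ih]
      simp
    · rw [if_neg hx, if_neg (by simpa using hx), ih]

lemma pairwise_children (L : List Int) (h : L.Pairwise (· < ·)) (hpos : ∀ x ∈ L, 0 ≤ x) :
    (L.flatMap (fun x => [10 * x, 10 * x + 5])).Pairwise (· < ·) := by
  induction L with
  | nil => simp
  | cons x xs ih =>
    rw [List.pairwise_cons] at h
    simp only [List.flatMap_cons]
    rw [List.pairwise_append]
    refine ⟨?_, ih h.2 (fun y hy => hpos y (List.mem_cons_of_mem _ hy)), ?_⟩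
    · have hx : 0 ≤ x := hpos x (List.mem_cons_self)
      simp only [List.pairwise_cons]
      refine ⟨?_, by simp⟩
      intro a ha
      simp at ha
      omega
    · intro a ha b hb
      simp only [List.mem_cons, List.not_mem_nil, or_false] at ha
      rw [List.mem_flatMap] at hb
      obtain ⟨y, hy, hby⟩ := hb
      have hxy : x < y := h.1 y hy
      have hy0 : 0 ≤ y := hpos y (List.mem_cons_of_mem _ hy)
      simp only [List.mem_cons, List.not_mem_nil, or_false] at hby
      rcases ha with ha | ha <;> rcases hby with hb' | hb' <;> omega

lemma anc_le (x y : Int) (hx : 0 ≤ x) (hy : 0 ≤ y) (h : Anc x y) : x ≤ y := by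
  obtain ⟨m, hm⟩ := h
  have := Nat.div_le_self y.toNat (10 ^ m)
  omega

-- the BFS loop invariant: sortedness plus exact membership of the final candidate list
lemma loop_spec (f : Nat) : ∀ (k : Nat) (r : Int) (cands level : List Int),
    r < 5 * 10 ^ (k + f) →
    cands.Pairwise (· < ·) →
    level.Pairwise (· < ·) →
    (∀ c ∈ cands, ∀ x ∈ level, c < x) →
    (∀ x ∈ level, Gh x) →
    (∀ x ∈ level, 5 * 10 ^ k ≤ x) →
    (∀ x ∈ level, x < 10 ^ (k + 1)) →
    (∀ y, Gh y → y ≤ r → y ∈ cands ∨ ∃ x ∈ level, Anc x y) →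
    (pvLoop r f cands level).Pairwise (· < ·) ∧
      (∀ z, z ∈ pvLoop r f cands level ↔ z ∈ cands ∨ (Gh z ∧ z ≤ r)) := by
  induction f with
  | zero =>
    intro k r cands level hr hcs hls hcl hlm hlb hub hcomp
    simp only [pvLoop]
    refine ⟨hcs, fun z => ⟨fun hz => Or.inl hz, ?_⟩⟩
    rintro (hz | ⟨hg, hzr⟩)
    · exact hz
    · rcases hcomp z hg hzr with h | ⟨x, hx, hax⟩
      · exact h
      · exfalso
        have h1 := hlb x hx
        have h2 : x ≤ z := anc_le x z (le_of_lt (hlm x hx).1) (le_of_lt hg.1) hax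
        simp only [Nat.add_zero] at hr
        omega
  | succ f ih =>
    intro k r cands level hr hcs hls hcl hlm hlb hub hcomp
    by_cases hemp : level.isEmpty
    · have hnil : level = [] := List.isEmpty_iff.mp hemp
      subst hnil
      simp only [pvLoop, List.isEmpty_nil, if_pos]
      refine ⟨hcs, fun z => ⟨fun hz => Or.inl hz, ?_⟩⟩
      rintro (hz | ⟨hg, hzr⟩)
      · exact hz
      · rcases hcomp z hg hzr with h | ⟨x, hx, _⟩
        · exact h
        · simp at hx
    · have hstep : pvLoop r (f + 1) cands level
          = pvLoop r f (cands ++ level.filter (fun x => decide (x ≤ r)))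
              ((level.filter (fun x => decide (x ≤ r))).flatMap (fun x => [10 * x, 10 * x + 5])) := by
        simp only [pvLoop, if_neg hemp, foldB, List.nil_append]
      rw [hstep]
      have ht : (0 : Int) < 10 ^ k := by positivity
      have hpow1 : (10 : Int) ^ (k + 1) = 10 * 10 ^ k := by ring
      have hLf : ∀ x, x ∈ level.filter (fun x => decide (x ≤ r)) → x ∈ level ∧ x ≤ r := by
        intro x hx
        rw [List.mem_filter] at hx
        exact ⟨hx.1, by simpa using hx.2⟩
      have hchild : ∀ z, z ∈ (level.filter (fun x => decide (x ≤ r))).flatMap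
          (fun x => [10 * x, 10 * x + 5]) ↔
          ∃ y, (y ∈ level ∧ y ≤ r) ∧ (z = 10 * y ∨ z = 10 * y + 5) := by
        intro z
        rw [List.mem_flatMap]
        constructor
        · rintro ⟨y, hy, hz⟩
          simp only [List.mem_cons, List.not_mem_nil, or_false] at hz
          exact ⟨y, hLf y hy, hz⟩
        · rintro ⟨y, ⟨hy, hyr⟩, hz⟩
          refine ⟨y, List.mem_filter.mpr ⟨hy, by simpa using hyr⟩, ?_⟩
          simp only [List.mem_cons, List.not_mem_nil, or_false]
          exact hz
      obtain ⟨S1, S2⟩ := ih (k + 1) r (cands ++ level.filter (fun x => decide (x ≤ r)))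
        ((level.filter (fun x => decide (x ≤ r))).flatMap (fun x => [10 * x, 10 * x + 5]))
        (by have h : k + 1 + f = k + (f + 1) := by omega
            rw [h]; exact hr)
        (by rw [List.pairwise_append]
            refine ⟨hcs, List.Pairwise.filter _ hls, ?_⟩
            intro c hc x hx
            exact hcl c hc x (hLf x hx).1)
        (by refine pairwise_children _ (List.Pairwise.filter _ hls) ?_
            intro x hx
            exact le_of_lt (hlm x (hLf x hx).1).1)
        (by intro c hc z hz
            rcases (hchild z).mp hz with ⟨y, ⟨hy, _⟩, hzy⟩
            have hy5 := hlb y hy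
            rcases List.mem_append.mp hc with hc | hc
            · have := hcl c hc y hy
              rcases hzy with h | h <;> omega
            · have := hub c (hLf c hc).1
              rw [hpow1] at this
              rcases hzy with h | h <;> omega)
        (by intro z hz
            rcases (hchild z).mp hz with ⟨y, ⟨hy, _⟩, hzy⟩
            have hgy := hlm y hy
            have hy0 : 0 < y := hgy.1
            have hgood := hgy.2
            constructor
            · rcases hzy with h | h <;> omega
            · rcases hzy with h | h
              · have hzt : z.toNat = 10 * y.toNat + 0 := by omega
                rw [hzt, good_child y.toNat 0 (by norm_num) hgood (by omega)]
                simp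
              · have hzt : z.toNat = 10 * y.toNat + 5 := by omega
                rw [hzt, good_child y.toNat 5 (by norm_num) hgood (by omega)]
                simp)
        (by intro z hz
            rcases (hchild z).mp hz with ⟨y, ⟨hy, _⟩, hzy⟩
            have hy5 := hlb y hy
            have h : (5 : Int) * 10 ^ (k + 1) = 10 * (5 * 10 ^ k) := by ring
            rcases hzy with h' | h' <;> omega)
        (by intro z hz
            rcases (hchild z).mp hz with ⟨y, ⟨hy, _⟩, hzy⟩
            have hyu := hub y hy
            have h : (10 : Int) ^ (k + 1 + 1) = 10 * 10 ^ (k + 1) := by ring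
            rcases hzy with h' | h' <;> omega)
        (by intro y' hgy' hy'r
            rcases hcomp y' hgy' hy'r with h | ⟨x, hx, m, hm⟩
            · exact Or.inl (List.mem_append.mpr (Or.inl h))
            · have hgx := hlm x hx
              have hxy' : x ≤ y' := anc_le x y' (le_of_lt hgx.1) (le_of_lt hgy'.1) ⟨m, hm⟩
              have hxr : x ≤ r := le_trans hxy' hy'r
              have hxLf : x ∈ level.filter (fun x => decide (x ≤ r)) :=
                List.mem_filter.mpr ⟨hx, by simpa using hxr⟩
              cases m with
              | zero =>
                have hxeq : x = y' := by
                  simp only [pow_zero, Nat.div_one] at hm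
                  have h1 := hgx.1
                  have h2 := hgy'.1
                  omega
                exact Or.inl (List.mem_append.mpr (Or.inr (hxeq ▸ hxLf)))
              | succ m' =>
                right
                have hz10 : y'.toNat / 10 ^ m' / 10 = x.toNat := by
                  rw [Nat.div_div_eq_div_mul, ← pow_succ]
                  exact hm
                have hgz : goodN (y'.toNat / 10 ^ m') = true := good_divpow y'.toNat m' hgy'.2
                have hz0 : 0 < y'.toNat / 10 ^ m' := by
                  have hx1 : 1 ≤ x.toNat := by have := hgx.1; omega
                  have := Nat.div_le_self (y'.toNat / 10 ^ m') 10
                  omega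
                rcases good_mod _ hz0 hgz with hd | hd
                · refine ⟨10 * x, (hchild _).mpr ⟨x, ⟨hx, hxr⟩, Or.inl rfl⟩, m', ?_⟩
                  have : (10 * x).toNat = 10 * x.toNat := by have := hgx.1; omega
                  rw [this]
                  omega
                · refine ⟨10 * x + 5, (hchild _).mpr ⟨x, ⟨hx, hxr⟩, Or.inr rfl⟩, m', ?_⟩
                  have : (10 * x + 5).toNat = 10 * x.toNat + 5 := by have := hgx.1; omega
                  rw [this]
                  omega)
      refine ⟨S1, fun z => ?_⟩
      rw [S2 z]
      constructor
      · rintro (hz | hz)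
        · rcases List.mem_append.mp hz with hz | hz
          · exact Or.inl hz
          · exact Or.inr ⟨hlm z (hLf z hz).1, (hLf z hz).2⟩
        · exact Or.inr hz
      · rintro (hz | hz)
        · exact Or.inl (List.mem_append.mpr (Or.inl hz))
        · exact Or.inr hz

-- two strictly increasing lists with the same members are equal
lemma eq_of_pairwise_lt_mem_iff : ∀ (xs ys : List Int), xs.Pairwise (· < ·) →
    ys.Pairwise (· < ·) → (∀ a, a ∈ xs ↔ a ∈ ys) → xs = ys := by
  intro xs
  induction xs with
  | nil =>
    intro ys _ _ hmem
    cases ys with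
    | nil => rfl
    | cons y ys => exact absurd ((hmem y).mpr List.mem_cons_self) (by simp)
  | cons x xs ih =>
    intro ys hxs hys hmem
    cases ys with
    | nil => exact absurd ((hmem x).mp List.mem_cons_self) (by simp)
    | cons y ys =>
      rw [List.pairwise_cons] at hxs hys
      have hxy : x = y := by
        rcases List.mem_cons.mp ((hmem x).mp List.mem_cons_self) with h | h
        · exact h
        · rcases List.mem_cons.mp ((hmem y).mpr List.mem_cons_self) with h' | h'
          · exact h'.symm
          · have := hxs.1 y h'
            have := hys.1 x h
            omega
      subst hxy
      congr 1
      refine ih ys hxs.2 hys.2 (fun a => ⟨fun ha => ?_, fun ha => ?_⟩)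
      · rcases List.mem_cons.mp ((hmem a).mp (List.mem_cons_of_mem _ ha)) with h | h
        · exact absurd (hxs.1 a ha) (by omega)
        · exact h
      · rcases List.mem_cons.mp ((hmem a).mpr (List.mem_cons_of_mem _ ha)) with h | h
        · exact absurd (hys.1 a ha) (by omega)
        · exact h

theorem solution_spec_main : ∀ (l r : Int), Dom_solution l r → solution l r = solution_alt l r := by
  intro l r hdom
  have hr31 : r ≤ 2147483648 := by
    simp only [Dom_solution, pvDomInt, Bool.and_eq_true, decide_eq_true_eq] at hdom
    exact hdom.2.2
  have hr : r < 5 * 10 ^ (0 + 20) := by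
    have h : (5 : Int) * 10 ^ (0 + 20) = 500000000000000000000 := by norm_num
    omega
  obtain ⟨hsorted, hmem⟩ := loop_spec 20 0 r [0] [5] hr
    (by simp) (by simp)
    (by intro c hc x hx; simp at hc hx; omega)
    (by intro x hx
        simp only [List.mem_singleton] at hx
        subst hx
        exact ⟨by norm_num, by decide⟩)
    (by intro x hx; simp at hx; omega)
    (by intro x hx; simp at hx; omega)
    (by intro y hgy hyr
        right
        refine ⟨5, by simp, ?_⟩
        obtain ⟨m, hmm⟩ := good_lead y.toNat (by have := hgy.1; omega) hgy.2
        exact ⟨m, by simpa using hmm⟩)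
  have hA : solution l r =
      (if ((PySem.List.pyRange l (r + 1) 1).filter pvPred).isEmpty
        then ((PySem.List.pyRange l (r + 1) 1).filter pvPred) ++ [-1]
        else (PySem.List.pyRange l (r + 1) 1).filter pvPred) := by
    unfold solution
    rw [foldA]
    simp only [List.nil_append, Bool.false_or]
    by_cases hF : ((PySem.List.pyRange l (r + 1) 1).filter pvPred).isEmpty
    · simp [hF]
    · simp [hF]
  have hFans : (PySem.List.pyRange l (r + 1) 1).filter pvPred
      = (pvLoop r 20 [0] [5]).filter (fun x => decide (l ≤ x) && decide (x ≤ r)) := by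
    apply eq_of_pairwise_lt_mem_iff
    · exact List.Pairwise.filter _ (PySem.List.pairwise_lt_pyRange_one l (r + 1))
    · exact List.Pairwise.filter _ hsorted
    · intro a
      rw [List.mem_filter, List.mem_filter, PySem.List.mem_pyRange_one, hmem a]
      simp only [List.mem_singleton, Bool.and_eq_true, decide_eq_true_eq]
      constructor
      · rintro ⟨⟨hla, har⟩, hp⟩
        obtain ⟨ha0, hg⟩ := (pvPred_iff a).mp hp
        rcases eq_or_lt_of_le ha0 with h0 | h0
        · exact ⟨Or.inl h0.symm, hla, by omega⟩
        · exact ⟨Or.inr ⟨⟨h0, hg⟩, by omega⟩, hla, by omega⟩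
      · rintro ⟨ha, hla, har⟩
        refine ⟨⟨hla, by omega⟩, (pvPred_iff a).mpr ?_⟩
        rcases ha with h0 | ⟨⟨hpos, hg⟩, _⟩
        · rw [h0]; exact ⟨le_refl 0, by decide⟩
        · exact ⟨by omega, hg⟩
  rw [hA, hFans]
  unfold solution_alt
  by_cases h : ((pvLoop r 20 [0] [5]).filter (fun x => decide (l ≤ x) && decide (x ≤ r))).isEmpty
  · rw [if_pos h, if_pos h, List.isEmpty_iff.mp h, List.nil_append]
  · rw [if_neg h, if_neg h]

-- ===== VERDICT (by name: the statement is the Claim_ definition above) =====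
theorem solution_spec : Claim_equal_solution := by
  intro l r hdom
  unfold Spec_solution
  exact solution_spec_main l r hdom
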